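-- pv_equiv track=rewrite | github.com/thehalleyyoung/halley-labs | refinement-type-inference-dynamic-lang/implementation/src/smt/stride_theory.py | compute_contiguous_strides
-- ===== SOURCE A (Python) =====
-- from typing import Any, Dict, List, Optional, Tuple
--
-- def compute_contiguous_strides(shape: Tuple[int, ...]) -> Tuple[int, ...]:
--     """Compute contiguous (row-major / C-order) strides for a shape.
--
--     Args:
--         shape: Tensor dimensions, e.g. (2, 3, 4).
--
--     Returns:
--         Strides tuple, e.g. (12, 4, 1) for shape (2, 3, 4).
--     """
--     if not shape:
--         return ()
--     n = len(shape)
--     strides = [0] * n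
--     strides[n - 1] = 1
--     for i in range(n - 2, -1, -1):
--         strides[i] = strides[i + 1] * shape[i + 1]
--     return tuple(strides)
-- ===== SOURCE B (Python) =====
-- def compute_contiguous_strides(shape):
--     """Compute contiguous (row-major / C-order) strides for a shape.
--
--     Divide and conquer: split the shape in half; the strides of the
--     concatenation are the left half's strides each scaled by the product of
--     the right half, followed by the right half's strides. Returns the strides
--     together with the half's total product so no separate product pass is needed.
--     """
--     def go(s):
--         if not s:
--             return [], 1
--         if len(s) == 1:
--             return [1], s[0]
--         mid = len(s) // 2
--         ls, lp = go(s[:mid])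
--         rs, rp = go(s[mid:])
--         return [x * rp for x in ls] + rs, lp * rp
--     return tuple(go(shape)[0])
-- ===== Notes on version B (the rewrite author's own statement) =====
-- stated objective: alternative
-- what changed: Replaces A's linear backward index loop carrying the running product in strides[i+1] by a divide-and-conquer recursion: split the shape in half, recurse on both halves, and combine as (left strides each scaled by the right half's product) ++ right strides, returning each half's product alongside; no index arithmetic or in-place array writes.
import Mathlib
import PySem

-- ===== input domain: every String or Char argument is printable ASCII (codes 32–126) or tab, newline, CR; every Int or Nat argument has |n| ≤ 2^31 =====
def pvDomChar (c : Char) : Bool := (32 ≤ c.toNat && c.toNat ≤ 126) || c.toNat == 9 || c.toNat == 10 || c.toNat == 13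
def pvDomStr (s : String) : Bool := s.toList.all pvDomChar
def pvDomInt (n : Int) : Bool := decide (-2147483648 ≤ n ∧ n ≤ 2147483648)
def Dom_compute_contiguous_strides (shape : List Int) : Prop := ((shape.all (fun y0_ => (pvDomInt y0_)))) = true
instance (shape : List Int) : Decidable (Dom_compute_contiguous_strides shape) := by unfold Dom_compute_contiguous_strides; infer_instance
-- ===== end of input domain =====

-- B replaces A's backward in-place loop carrying running state by a stateless
-- divide-and-conquer on the shape (left strides scaled by the right half's product ++ right strides); objective: alternative.

-- ===== PORT A =====
-- loop body of A: strides[i] = strides[i+1] * shape[i+1]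
def pvStepA (shape : List Int) (st : List Int) (i : Int) : List Int :=
  PySem.List.pySetD st i
    (PySem.List.pyGetD st (i + 1) 0 * PySem.List.pyGetD shape (i + 1) 0)

def compute_contiguous_strides (shape : List Int) : List Int :=
  if shape = [] then []
  else
    let n : Int := shape.length
    let strides : List Int := List.replicate shape.length 0
    let strides := PySem.List.pySetD strides (n - 1) 1
    (PySem.List.pyRange (n - 2) (-1) (-1)).foldl (pvStepA shape) strides

-- ===== PORT B =====
-- go(s): divide and conquer; returns (strides of s, product of s)
-- base case s[0] on a singleton list is its head (exact: list nonempty)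
def pvGo (s : List Int) : List Int × Int :=
  if h : s = [] then ([], 1)
  else if h1 : s.length = 1 then ([1], s.headI)
  else
    let mid := s.length / 2
    let l := pvGo (s.take mid)
    let r := pvGo (s.drop mid)
    (l.1.map (· * r.2) ++ r.1, l.2 * r.2)
termination_by s.length
decreasing_by
  · have : s.length ≠ 0 := fun h0 => h (List.eq_nil_of_length_eq_zero h0)
    simp [List.length_take]; omega
  · have : s.length ≠ 0 := fun h0 => h (List.eq_nil_of_length_eq_zero h0)
    simp [List.length_drop]; omega

-- tuple(go(shape)[0])
def compute_contiguous_strides_alt (shape : List Int) : List Int :=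
  (pvGo shape).1

-- ===== PRECONDITION & SPEC =====
def Spec_compute_contiguous_strides (shape : List Int) (out : List Int) : Prop := out = compute_contiguous_strides_alt shape
instance (shape : List Int) (out : List Int) : Decidable (Spec_compute_contiguous_strides shape out) := by unfold Spec_compute_contiguous_strides; infer_instance

-- ===== CLAIM (what is proved, stated in full; the proofs are below) =====
def Claim_equal_compute_contiguous_strides : Prop := ∀ (shape : List Int), Dom_compute_contiguous_strides shape → Spec_compute_contiguous_strides shape (compute_contiguous_strides shape)

-- ===== LEMMAS AND PROOFS =====

-- the specification B's divide-and-conquer meets: strides[i] = product of the suffix after i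
def pvSpecStrides (s : List Int) : List Int :=
  (List.range s.length).map (fun i => (s.drop (i + 1)).prod)

theorem pvSpec_append (a b : List Int) :
    pvSpecStrides (a ++ b) = (pvSpecStrides a).map (· * b.prod) ++ pvSpecStrides b := by
  unfold pvSpecStrides
  rw [List.length_append, List.range_add, List.map_append, List.map_map, List.map_map]
  congr 1
  · refine List.map_congr_left (fun i hi => ?_)
    have hi' : i < a.length := List.mem_range.mp hi
    have h1 : i + 1 ≤ a.length := hi'
    simp only [Function.comp_apply]
    rw [List.drop_append_of_le_length h1, List.prod_append]
  · refine List.map_congr_left (fun i hi => ?_)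
    simp only [Function.comp_apply]
    have h2 : a.length + i + 1 = a.length + (i + 1) := by omega
    rw [h2, List.drop_append]
    have h3 : List.drop (a.length + (i + 1)) a = [] := by
      apply List.drop_eq_nil_of_le; omega
    rw [h3, List.nil_append]
    have h4 : a.length + (i + 1) - a.length = i + 1 := by omega
    rw [h4]

theorem pvGo_eq (s : List Int) : pvGo s = (pvSpecStrides s, s.prod) := by
  induction s using pvGo.induct with
  | case1 =>
    unfold pvGo pvSpecStrides; simp
  | case2 s h h1 =>
    match s, h1 with
    | [d], _ =>
      unfold pvGo pvSpecStrides
      simp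
  | case3 s h h1 mid ihl ihr =>
    unfold pvGo
    rw [dif_neg h, dif_neg h1]
    simp only []
    rw [ihl, ihr]
    have hsplit : s.take (s.length / 2) ++ s.drop (s.length / 2) = s := List.take_append_drop _ _
    refine Prod.ext ?_ ?_
    · show (pvSpecStrides (s.take (s.length / 2))).map (· * (s.drop (s.length / 2)).prod)
          ++ pvSpecStrides (s.drop (s.length / 2)) = pvSpecStrides s
      rw [← pvSpec_append, hsplit]
    · show (s.take (s.length / 2)).prod * (s.drop (s.length / 2)).prod = s.prod
      rw [← List.prod_append, hsplit]

theorem pvAltLength (s : List Int) :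
    (compute_contiguous_strides_alt s).length = s.length := by
  unfold compute_contiguous_strides_alt
  rw [pvGo_eq]; unfold pvSpecStrides; simp

theorem pvAltGet (s : List Int) (i : Nat) (hi : i < s.length) :
    (compute_contiguous_strides_alt s)[i]? = some ((s.drop (i + 1)).prod) := by
  unfold compute_contiguous_strides_alt
  rw [pvGo_eq]
  unfold pvSpecStrides
  rw [List.getElem?_map, List.getElem?_range hi]
  rfl

theorem pvAltGetNone (s : List Int) (i : Nat) (hi : s.length ≤ i) :
    (compute_contiguous_strides_alt s)[i]? = none := by
  rw [List.getElem?_eq_none]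
  rw [pvAltLength]; exact hi

-- one iteration of A's loop establishes the suffix-product value at index j
theorem pvStepCorrect (shape st : List Int) (j : Nat)
    (hlen : st.length = shape.length) (hj : j + 1 < shape.length)
    (hst : ∀ i : Nat, j < i → st[i]? = (compute_contiguous_strides_alt shape)[i]?) :
    (pvStepA shape st (j : Int)).length = shape.length ∧
      ∀ i : Nat, j ≤ i →
        (pvStepA shape st (j : Int))[i]? = (compute_contiguous_strides_alt shape)[i]? := by
  have hset : pvStepA shape st (j : Int)
      = st.set j (PySem.List.pyGetD st ((j : Int) + 1) 0 * PySem.List.pyGetD shape ((j : Int) + 1) 0) := by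
    unfold pvStepA
    rw [PySem.List.pySetD_natCast]
  refine ⟨by rw [hset]; simpa using hlen, fun i hi => ?_⟩
  rcases eq_or_lt_of_le hi with rfl | hlt
  · -- the freshly written index
    have hjs : j < st.length := by omega
    have hget1 : PySem.List.pyGetD st ((j : Int) + 1) 0 = (shape.drop (j + 2)).prod := by
      have : ((j : Int) + 1) = ((j + 1 : Nat) : Int) := by push_cast; ring
      rw [this, PySem.List.pyGetD_natCast]
      have := hst (j + 1) (by omega)
      rw [List.getD_eq_getElem?_getD, this, pvAltGet shape (j + 1) hj]
      rfl
    have hget2 : PySem.List.pyGetD shape ((j : Int) + 1) 0 = shape[j + 1]'hj := by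
      have : ((j : Int) + 1) = ((j + 1 : Nat) : Int) := by push_cast; ring
      rw [this, PySem.List.pyGetD_natCast]
      rw [List.getD_eq_getElem?_getD, List.getElem?_eq_getElem hj]
      rfl
    rw [hset, List.getElem?_set_self (by omega), hget1, hget2]
    rw [pvAltGet shape j (by omega)]
    have hdrop : shape.drop (j + 1) = shape[j + 1]'hj :: shape.drop (j + 2) := by
      rw [List.drop_eq_getElem_cons hj]
    rw [hdrop, List.prod_cons]
    exact congrArg some (mul_comm _ _)
  · rw [hset, List.getElem?_set_ne (by omega)]
    exact hst i hlt

-- invariant of A's countdown loop: entries above j already agree with B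
theorem pvLoopInv (shape : List Int) (j : Nat) :
    ∀ st : List Int, st.length = shape.length → j + 1 < shape.length →
    (∀ i : Nat, j < i → st[i]? = (compute_contiguous_strides_alt shape)[i]?) →
    (PySem.List.pyRange (j : Int) (-1) (-1)).foldl (pvStepA shape) st
      = compute_contiguous_strides_alt shape := by
  induction j with
  | zero =>
    intro st hlen hj hst
    rw [PySem.List.pyRange_neg_one_cons (by norm_num),
        PySem.List.pyRange_neg_one_eq_nil (by norm_num)]
    simp only [List.foldl_cons, List.foldl_nil]
    obtain ⟨hl, hg⟩ := pvStepCorrect shape st 0 hlen hj hst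
    apply List.ext_getElem?
    intro i
    exact hg i (Nat.zero_le i)
  | succ j ih =>
    intro st hlen hj hst
    have hcast : ((j + 1 : Nat) : Int) = (j : Int) + 1 := by push_cast; ring
    rw [hcast, PySem.List.pyRange_neg_one_cons (by omega)]
    have hsub : (j : Int) + 1 - 1 = (j : Int) := by ring
    rw [hsub]
    simp only [List.foldl_cons]
    obtain ⟨hl, hg⟩ := pvStepCorrect shape st (j + 1) hlen hj (fun i hi => hst i hi)
    rw [← hcast]
    exact ih (pvStepA shape st ((j + 1 : Nat) : Int)) hl (by omega)
      (fun i hi => hg i (by omega))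

-- ===== VERDICT (by name: the statement is the Claim_ definition above) =====
theorem compute_contiguous_strides_spec : Claim_equal_compute_contiguous_strides := by
  intro shape _
  unfold Spec_compute_contiguous_strides
  match shape with
  | [] =>
    unfold compute_contiguous_strides compute_contiguous_strides_alt
    rw [pvGo_eq]
    simp [pvSpecStrides]
  | [d] =>
    unfold compute_contiguous_strides
    rw [if_neg (by simp)]
    simp only [List.length_cons, List.length_nil]
    rw [show ((1 : Nat) : Int) - 2 = -1 by norm_num,
        PySem.List.pyRange_neg_one_eq_nil (by norm_num)]
    simp only [List.foldl_nil]
    rw [show ((1 : Nat) : Int) - 1 = ((0 : Nat) : Int) by norm_num,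
        PySem.List.pySetD_natCast]
    apply List.ext_getElem?
    intro i
    match i with
    | 0 => rw [pvAltGet [d] 0 (by simp)]; rfl
    | i + 1 => rw [pvAltGetNone [d] (i + 1) (by simp)]; rfl
  | d0 :: d1 :: t =>
    unfold compute_contiguous_strides
    rw [if_neg (by simp)]
    simp only
    set shape := d0 :: d1 :: t with hshape
    have hcast2 : ((shape.length : Int)) - 2 = ((shape.length - 2 : Nat) : Int) := by
      have : 2 ≤ shape.length := by simp only [hshape, List.length_cons]; omega
      push_cast [this]; ring
    have hcast1 : ((shape.length : Int)) - 1 = ((shape.length - 1 : Nat) : Int) := by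
      have : 1 ≤ shape.length := by simp [hshape]
      push_cast [this]; ring
    rw [hcast1, PySem.List.pySetD_natCast, hcast2]
    apply pvLoopInv shape (shape.length - 2)
    · simp
    · simp only [hshape, List.length_cons]; omega
    · intro i hi
      have hlen2 : 2 ≤ shape.length := by simp only [hshape, List.length_cons]; omega
      by_cases hil : i < shape.length
      · have hie : i = shape.length - 1 := by omega
        subst hie
        rw [List.getElem?_set_self' , pvAltGet shape (shape.length - 1) (by omega)]
        have : shape.drop (shape.length - 1 + 1) = [] := by
          apply List.drop_eq_nil_of_le; omega
        simp [this, List.getElem?_eq_getElem (by simp; omega : shape.length - 1 < (List.replicate shape.length (0:Int)).length)]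
      · rw [pvAltGetNone shape i (by omega), List.getElem?_eq_none]
        simp; omega
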